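-- pv_equiv track=rewrite | github.com/testing-agent/droidagent | droidagent/action_prompt_v2.py | parse_action_id
-- ===== SOURCE A (Python) =====
-- def parse_action_id(result):
--     if result.strip().isdigit() or result.strip() == '-1':
--         return result.strip()
--
--     next_action_id = None
--
--     for l in result.split('\n'):
--         l = l.strip()
--         if l.startswith('End the task?:'):
--             end_task = l.split(':')[1].strip().lower()
--             if end_task == 'yes':
--                 next_action_id = '-1'
--                 break
--         if l.startswith('Action ID:') or l.startswith('action ID:') or l.startswith('action id:'):
--             next_action_id = l.split(':')[1].strip()
--
--     return next_action_id
-- ===== SOURCE B (Python) =====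
-- def parse_action_id(result):
--     s = result.strip()
--     if s.isdigit() or s == '-1':
--         return s
--     lines = [l.strip() for l in result.split('\n')]
--     if any(l.startswith('End the task?:') and l.split(':')[1].strip().lower() == 'yes'
--            for l in lines):
--         return '-1'
--     for l in reversed(lines):
--         if l.startswith(('Action ID:', 'action ID:', 'action id:')):
--             return l.split(':')[1].strip()
--     return None
-- ===== Notes on version B (the rewrite author's own statement) =====
-- stated objective: simpler
-- what changed: The single fused loop with mutable state and break is replaced by two independent passes over the stripped lines: an any-scan deciding the early-exit sentinel return, then a reverse scan returning the value of the last matching action-ID line.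
import Mathlib
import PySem

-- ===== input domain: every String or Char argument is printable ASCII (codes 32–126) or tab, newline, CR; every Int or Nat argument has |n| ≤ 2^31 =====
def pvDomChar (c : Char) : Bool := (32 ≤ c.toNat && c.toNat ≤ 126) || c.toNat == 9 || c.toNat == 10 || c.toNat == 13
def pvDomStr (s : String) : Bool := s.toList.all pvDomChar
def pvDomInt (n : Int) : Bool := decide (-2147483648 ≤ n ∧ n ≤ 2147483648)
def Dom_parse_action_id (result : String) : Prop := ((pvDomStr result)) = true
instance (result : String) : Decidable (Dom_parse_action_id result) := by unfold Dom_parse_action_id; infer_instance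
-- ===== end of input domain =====

-- B replaces A's fused break-loop by two independent passes (an any-scan for an end-task-yes line,
-- then a reverse scan for the last action-ID line); objective: simpler.

-- s.split(sep) for nonempty literal sep: PySem.Str.split? is none only for sep = ""
def pvSplit (s sep : String) : List String := (PySem.Str.split? s sep).getD []

-- shared string helpers (both Pythons compute l.split(':')[1].strip() and the same prefix tests)
-- pyGet? never returns none here: both callers test first that s starts with a prefix containing ':'
def pvSplitVal (s : String) : String :=
  PySem.Str.strip ((PySem.List.pyGet? (pvSplit s ":") 1).getD "")

def pvIsAction (s : String) : Bool :=
  PySem.Str.startswith s "Action ID:" || PySem.Str.startswith s "action ID:" ||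
    PySem.Str.startswith s "action id:"

-- ===== PORT A =====
-- A's for-loop with mutable next_action_id and break
def pvALoop : List String → Option String → Option String
  | [], acc => acc
  | l :: rest, acc =>
    let s := PySem.Str.strip l
    if PySem.Str.startswith s "End the task?:" then
      if PySem.Str.lower (pvSplitVal s) == "yes" then some "-1"   -- break; returns '-1'
      else if pvIsAction s then pvALoop rest (some (pvSplitVal s)) else pvALoop rest acc
    else if pvIsAction s then pvALoop rest (some (pvSplitVal s)) else pvALoop rest acc

def parse_action_id (result : String) : Option String :=
  if PySem.Str.strIsdigit (PySem.Str.strip result) || PySem.Str.strip result == "-1" then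
    some (PySem.Str.strip result)   -- Python calls result.strip() afresh in the guard and the return
  else pvALoop (pvSplit result "\n") none

-- ===== PORT B =====
def pvEndYes (s : String) : Bool :=
  PySem.Str.startswith s "End the task?:" && PySem.Str.lower (pvSplitVal s) == "yes"

-- B's reverse scan: first action line of the given list, its value
def pvFindAction : List String → Option String
  | [] => none
  | l :: rest => if pvIsAction l then some (pvSplitVal l) else pvFindAction rest

def parse_action_id_alt (result : String) : Option String :=
  if PySem.Str.strIsdigit (PySem.Str.strip result) || PySem.Str.strip result == "-1" then
    some (PySem.Str.strip result)
  else
    let lines := (pvSplit result "\n").map PySem.Str.strip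
    if lines.any pvEndYes then some "-1"
    else pvFindAction lines.reverse

-- ===== PRECONDITION & SPEC =====
def Spec_parse_action_id (result : String) (out : Option String) : Prop := out = parse_action_id_alt result
instance (result : String) (out : Option String) : Decidable (Spec_parse_action_id result out) := by unfold Spec_parse_action_id; infer_instance

-- ===== CLAIM (what is proved, stated in full; the proofs are below) =====
def Claim_equal_parse_action_id : Prop := ∀ (result : String), Dom_parse_action_id result → Spec_parse_action_id result (parse_action_id result)

-- ===== LEMMAS AND PROOFS =====

-- a line starting with the end-task prefix starts with none of the action prefixes (first char differs)
lemma pv_end_not_action (s : String)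
    (h : PySem.Str.startswith s "End the task?:" = true) : pvIsAction s = false := by
  have hpref : ("End the task?:".toList) <+: s.toList :=
    (PySem.Chars.startswith_iff _ _).mp (by simpa using h)
  have hhead : s.toList.head? = some 'E' := by
    obtain ⟨t, ht⟩ := hpref
    rw [← ht]; simp
  have gen : ∀ (p : String) (c : Char) (cs : List Char), p.toList = c :: cs → c ≠ 'E' →
      PySem.Str.startswith s p = false := by
    intro p c cs hp hc
    cases hx : PySem.Str.startswith s p with
    | false => rfl
    | true =>
      have hpref2 : p.toList <+: s.toList := (PySem.Chars.startswith_iff _ _).mp (by simpa using hx)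
      obtain ⟨u, hu⟩ := hpref2
      rw [← hu, hp] at hhead
      simp at hhead
      exact absurd hhead hc
  have h1 := gen "Action ID:" 'A' "ction ID:".toList (by simp) (by decide)
  have h2 := gen "action ID:" 'a' "ction ID:".toList (by simp) (by decide)
  have h3 := gen "action id:" 'a' "ction id:".toList (by simp) (by decide)
  unfold pvIsAction
  rw [h1, h2, h3]
  decide

lemma pvFindAction_append (xs ys : List String) :
    pvFindAction (xs ++ ys) = (pvFindAction xs).or (pvFindAction ys) := by
  induction xs with
  | nil => simp [pvFindAction]
  | cons x xs ih =>
    simp only [List.cons_append, pvFindAction, ih]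
    split_ifs <;> simp

-- A's loop equals: the sentinel if some line is an end-task-yes line, else the last action value, else the accumulator
lemma pvALoop_eq (ls : List String) (acc : Option String) :
    pvALoop ls acc =
      if (ls.map PySem.Str.strip).any pvEndYes then some "-1"
      else (pvFindAction (ls.map PySem.Str.strip).reverse).or acc := by
  induction ls generalizing acc with
  | nil => simp [pvALoop, pvFindAction]
  | cons l rest ih =>
    simp only [pvALoop, List.map_cons, List.any_cons, List.reverse_cons, pvFindAction_append]
    cases hE : PySem.Str.startswith (PySem.Str.strip l) "End the task?:" with
    | true =>
      cases hY : (PySem.Str.lower (pvSplitVal (PySem.Str.strip l)) == "yes") with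
      | true =>
        have hEY : pvEndYes (PySem.Str.strip l) = true := by
          simp only [pvEndYes, hE, hY, Bool.and_self]
        rw [hEY]
        simp only [if_true, Bool.true_or]
      | false =>
        have hEY : pvEndYes (PySem.Str.strip l) = false := by
          simp only [pvEndYes, hE, hY, Bool.and_false]
        have hA : pvIsAction (PySem.Str.strip l) = false := pv_end_not_action _ hE
        have hnone : pvFindAction [PySem.Str.strip l] = none := by
          simp only [pvFindAction, hA, Bool.false_eq_true, if_false]
        rw [hEY, hA, hnone]
        simp only [if_true, Bool.false_eq_true, if_false, Bool.false_or, Option.or_none]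
        exact ih acc
    | false =>
      have hEY : pvEndYes (PySem.Str.strip l) = false := by
        simp only [pvEndYes, hE, Bool.false_and]
      rw [hEY]
      cases hA : pvIsAction (PySem.Str.strip l) with
      | true =>
        have hone : pvFindAction [PySem.Str.strip l] = some (pvSplitVal (PySem.Str.strip l)) := by
          simp only [pvFindAction, hA, if_true]
        rw [hone]
        simp only [Bool.false_eq_true, if_false, if_true, Bool.false_or]
        rw [ih]
        split_ifs with h
        · rfl
        · rw [Option.or_assoc]; simp
      | false =>
        have hnone : pvFindAction [PySem.Str.strip l] = none := by
          simp only [pvFindAction, hA, Bool.false_eq_true, if_false]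
        rw [hnone]
        simp only [Bool.false_eq_true, if_false, Bool.false_or, Option.or_none]
        exact ih acc

-- ===== VERDICT (by name: the statement is the Claim_ definition above) =====
theorem parse_action_id_spec : Claim_equal_parse_action_id := by
  intro result _
  unfold Spec_parse_action_id parse_action_id parse_action_id_alt
  dsimp only
  split_ifs with h h2
  · rfl
  · rw [pvALoop_eq, Option.or_none, if_pos h2]
  · rw [pvALoop_eq, Option.or_none, if_neg h2]
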